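-- pv_equiv track=rewrite | github.com/boochos/work | setProjectToolSivfx_dev_2022.py | splitEndNumFromString
-- ===== SOURCE A (Python) =====
-- def splitEndNumFromString( name ):
--     num = ''
--     rName = ''
--     for i in name:
--         try:
--             int( i )
--             num += i
--         except:
--             rName += num + i
--             num = ''
--     if num == '':
--         extracted = '%04d' % ( 0000 )
--     else:
--         extracted = '%04d' % ( int( num ) )
--
--     return rName, extracted
-- ===== SOURCE B (Python) =====
-- def splitEndNumFromString(name):
--     i = len(name)
--     while i > 0 and '0' <= name[i - 1] <= '9':
--         i -= 1
--     trailing = name[i:]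
--     extracted = '%04d' % (int(trailing) if trailing else 0)
--     return name[:i], extracted
-- ===== Notes on version B (the rewrite author's own statement) =====
-- stated objective: faster
-- what changed: Replaces the per-character accumulator loop (rebuilding num/rName via try/except int() on every character) by a single backwards scan that finds the trailing digit run and one slice.
import Mathlib
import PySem

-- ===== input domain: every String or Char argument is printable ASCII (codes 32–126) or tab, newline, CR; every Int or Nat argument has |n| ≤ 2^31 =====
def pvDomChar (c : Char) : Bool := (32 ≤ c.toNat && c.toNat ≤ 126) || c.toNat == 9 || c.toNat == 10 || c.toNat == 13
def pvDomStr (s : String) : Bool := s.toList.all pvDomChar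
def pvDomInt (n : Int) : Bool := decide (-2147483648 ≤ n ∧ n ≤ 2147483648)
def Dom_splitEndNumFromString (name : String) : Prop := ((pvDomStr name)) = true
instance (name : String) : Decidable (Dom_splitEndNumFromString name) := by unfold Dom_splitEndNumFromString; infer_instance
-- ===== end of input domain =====

-- B scans only the trailing digit run from the right (no per-character accumulator over the whole
-- string); objective: faster (measured), same return value on every printable-ASCII string.

-- shared '%04d' % n formatting (only ever applied to nonnegative n here)
def pvFmt04 (n : Int) : List Char :=
  let ds := PySem.Int.toChars n
  List.replicate (4 - ds.length) '0' ++ ds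

-- ===== PORT A =====
-- state is (num, rName); try: int(i) is ofChars? [c] (none = the except branch)
def pvStepA (st : List Char × List Char) (c : Char) : List Char × List Char :=
  match PySem.Int.ofChars? [c] with
  | some _ => (st.1 ++ [c], st.2)
  | none   => ([], st.2 ++ st.1 ++ [c])

def splitEndNumFromString (name : String) : String × String :=
  let st := name.toList.foldl pvStepA ([], [])
  let extracted := if st.1 = [] then pvFmt04 0 else pvFmt04 ((PySem.Int.ofChars? st.1).getD 0)
  (String.ofList st.2, String.ofList extracted)

-- ===== PORT B =====
def pvIsDig (c : Char) : Bool := decide ('0' ≤ c) && decide (c ≤ '9')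

-- the while loop: i starts at len(name), decreases while name[i-1] is a digit
def pvFindSplit (s : List Char) : Nat → Nat
  | 0 => 0
  | i + 1 => if pvIsDig (s.getD i ' ') then pvFindSplit s i else i + 1

def splitEndNumFromString_alt (name : String) : String × String :=
  let s := name.toList
  let i := pvFindSplit s s.length
  let trailing := s.drop i
  let extracted := if trailing = [] then pvFmt04 0 else pvFmt04 ((PySem.Int.ofChars? trailing).getD 0)
  (String.ofList (s.take i), String.ofList extracted)

-- ===== PRECONDITION & SPEC =====
def Spec_splitEndNumFromString (name : String) (out : String × String) : Prop := out = splitEndNumFromString_alt name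
instance (name : String) (out : String × String) : Decidable (Spec_splitEndNumFromString name out) := by unfold Spec_splitEndNumFromString; infer_instance

-- ===== CLAIM (what is proved, stated in full; the proofs are below) =====
def Claim_equal_splitEndNumFromString : Prop := ∀ (name : String), Dom_splitEndNumFromString name → Spec_splitEndNumFromString name (splitEndNumFromString name)

-- ===== LEMMAS AND PROOFS =====

-- A's per-character digit test
def pvDigA (c : Char) : Bool := (PySem.Int.ofChars? [c]).isSome

-- on the domain's characters the two digit tests agree
lemma pv_dig_eq (c : Char) (h : pvDomChar c = true) : pvDigA c = pvIsDig c := by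
  have hn : c.toNat < 127 := by
    simp only [pvDomChar, Bool.or_eq_true, Bool.and_eq_true, decide_eq_true_eq, beq_iff_eq] at h
    omega
  have key : ∀ n, n < 127 → pvDigA (Char.ofNat n) = pvIsDig (Char.ofNat n) := by decide
  have := key c.toNat hn
  rwa [Char.ofNat_toNat] at this

lemma pv_takeWhile_congr {p q : Char → Bool} {l : List Char} (h : ∀ x ∈ l, p x = q x) :
    l.takeWhile p = l.takeWhile q := by
  induction l with
  | nil => rfl
  | cons a t ih =>
    simp only [List.takeWhile_cons, h a (by simp)]
    split <;> simp_all

lemma pv_rtakeWhile_congr {p q : Char → Bool} {l : List Char} (h : ∀ x ∈ l, p x = q x) :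
    l.rtakeWhile p = l.rtakeWhile q := by
  simp only [List.rtakeWhile]
  rw [pv_takeWhile_congr (by simpa using fun x hx => h x hx)]

lemma pv_rdropWhile_congr {p q : Char → Bool} {l : List Char} (h : ∀ x ∈ l, p x = q x) :
    l.rdropWhile p = l.rdropWhile q := by
  have h1 : l.rdropWhile p ++ l.rtakeWhile p = l := List.rdropWhile_append_rtakeWhile
  have h2 : l.rdropWhile q ++ l.rtakeWhile q = l := List.rdropWhile_append_rtakeWhile
  rw [pv_rtakeWhile_congr h] at h1
  exact List.append_cancel_right (h1.trans h2.symm)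

-- A's fold computes the trailing digit run and the remainder
lemma pv_fold (l : List Char) :
    l.foldl pvStepA ([], []) = (l.rtakeWhile pvDigA, l.rdropWhile pvDigA) := by
  induction l using List.reverseRecOn with
  | nil => simp
  | append_singleton t c ih =>
    rw [List.foldl_append, ih]
    cases hc : PySem.Int.ofChars? [c] with
    | some v =>
      have hd : pvDigA c = true := by simp [pvDigA, hc]
      simp only [List.foldl_cons, List.foldl_nil, pvStepA, hc]
      rw [List.rtakeWhile_concat_pos _ _ _ hd, List.rdropWhile_concat_pos _ _ _ hd]
    | none =>
      have hd : ¬ pvDigA c = true := by simp [pvDigA, hc]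
      simp only [List.foldl_cons, List.foldl_nil, pvStepA, hc]
      rw [List.rtakeWhile_concat_neg _ _ _ hd, List.rdropWhile_concat_neg _ _ _ hd,
        (List.rdropWhile_append_rtakeWhile : List.rdropWhile pvDigA t ++ List.rtakeWhile pvDigA t = t)]

-- B's while loop lands on the length of the remainder
lemma pv_find (l : List Char) (i : Nat) (h : i ≤ l.length) :
    pvFindSplit l i = ((l.take i).rdropWhile pvIsDig).length := by
  induction i with
  | zero => simp [pvFindSplit]
  | succ i ih =>
    have hi : i < l.length := h
    have htake : l.take (i + 1) = l.take i ++ [l[i]] := by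
      rw [List.take_add_one]; simp [List.getElem?_eq_getElem hi]
    have hget : l.getD i ' ' = l[i] := List.getD_eq_getElem l ' ' hi
    simp only [pvFindSplit, hget, htake]
    cases hd : pvIsDig l[i] with
    | true =>
      rw [List.rdropWhile_concat_pos _ _ _ hd, if_pos rfl]
      exact ih (Nat.le_of_lt hi)
    | false =>
      rw [List.rdropWhile_concat_neg _ _ _ (by simp_all), if_neg (by simp_all)]
      simp only [List.length_append, List.length_take, List.length_cons, List.length_nil]
      omega

-- ===== VERDICT (by name: the statement is the Claim_ definition above) =====
theorem splitEndNumFromString_spec : Claim_equal_splitEndNumFromString := by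
  intro name hdom
  unfold Spec_splitEndNumFromString splitEndNumFromString splitEndNumFromString_alt
  have hall : ∀ c ∈ name.toList, pvDigA c = pvIsDig c := by
    intro c hc
    apply pv_dig_eq
    have := hdom
    unfold Dom_splitEndNumFromString pvDomStr at this
    exact List.all_eq_true.mp this c hc
  set l := name.toList with hl
  have hfold := pv_fold l
  have hrt : l.rtakeWhile pvDigA = l.rtakeWhile pvIsDig := pv_rtakeWhile_congr hall
  have hrd : l.rdropWhile pvDigA = l.rdropWhile pvIsDig := pv_rdropWhile_congr hall
  have hfind := pv_find l l.length (Nat.le_refl _)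
  rw [List.take_length] at hfind
  have hsplit : l.rdropWhile pvIsDig ++ l.rtakeWhile pvIsDig = l := List.rdropWhile_append_rtakeWhile
  have htake : l.take (pvFindSplit l l.length) = l.rdropWhile pvIsDig := by
    rw [hfind]
    have h := List.take_left' (l₁ := l.rdropWhile pvIsDig) (l₂ := l.rtakeWhile pvIsDig) rfl
    rwa [hsplit] at h
  have hdrop : l.drop (pvFindSplit l l.length) = l.rtakeWhile pvIsDig := by
    rw [hfind]
    have h := List.drop_left' (l₁ := l.rdropWhile pvIsDig) (l₂ := l.rtakeWhile pvIsDig) rfl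
    rwa [hsplit] at h
  dsimp only
  simp only [hfold, htake, hdrop, hrt, hrd]
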